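-- pv_equiv track=rewrite | github.com/GeoffroyGit/ephesus | ephesus/timedate.py | force_digits_only
-- ===== SOURCE A (Python) =====
-- def force_digits_only(tokens):
--     '''
--     preprocessing : force tokens to be digits only or char only
--     '''
--     tokens_clean = []
--     for token in tokens:
--         # check if the token is made of a majority of digits or not
--         if sum([letter.isdigit() for letter in token]) >= (len(token) / 2):
--             # keep digits only
--             token_clean = "".join([letter for letter in token if letter.isdigit()])
--         else:
--             # remove digits
--             token_clean = "".join([letter for letter in token if not letter.isdigit()])
--         tokens_clean.append(token_clean)
--     return tokens_clean
-- ===== SOURCE B (Python) =====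
-- def force_digits_only(tokens):
--     '''
--     preprocessing : force tokens to be digits only or char only
--     '''
--     out = []
--     for token in tokens:
--         digits = []
--         others = []
--         for ch in token:
--             (digits if ch.isdigit() else others).append(ch)
--         out.append("".join(digits if len(digits) >= len(others) else others))
--     return out
-- ===== Notes on version B (the rewrite author's own statement) =====
-- stated objective: faster
-- what changed: One pass per token partitions characters into digit and non-digit accumulators and picks the longer (ties to digits), replacing A's count-then-refilter which scans each token twice (three times counting the boolean list build).
import Mathlib
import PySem

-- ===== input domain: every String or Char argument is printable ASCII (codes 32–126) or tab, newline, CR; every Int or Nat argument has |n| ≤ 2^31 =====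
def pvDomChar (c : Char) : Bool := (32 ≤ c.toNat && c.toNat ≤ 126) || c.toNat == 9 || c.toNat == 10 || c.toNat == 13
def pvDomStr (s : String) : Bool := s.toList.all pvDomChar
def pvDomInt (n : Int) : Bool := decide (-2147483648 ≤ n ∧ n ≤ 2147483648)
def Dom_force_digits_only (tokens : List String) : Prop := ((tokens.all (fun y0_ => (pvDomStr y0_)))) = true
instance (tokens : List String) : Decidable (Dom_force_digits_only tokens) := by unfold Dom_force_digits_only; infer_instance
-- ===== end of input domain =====

-- B replaces A's count-then-conditional-refilter (several scans per token) by a single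
-- partition pass per token followed by a length comparison; same values everywhere.

-- ===== PORT A =====
-- 'sum([letter.isdigit() for letter in token]) >= (len(token) / 2)' compares an int with a
-- float len/2; exact here as 2*sum ≥ len (both sides integers, halves are exact in float).
def force_digits_only (tokens : List String) : List String :=
  tokens.foldl (fun tokens_clean token =>
    let cs := token.toList
    let token_clean :=
      if 2 * ((cs.map (fun letter => PySem.Chars.isdigit letter)).foldl
                (fun s b => s + (if b then (1 : Int) else 0)) 0) ≥ (cs.length : Int) then
        String.mk (cs.filter (fun letter => PySem.Chars.isdigit letter))
      else
        String.mk (cs.filter (fun letter => !PySem.Chars.isdigit letter))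
    tokens_clean ++ [token_clean]) []

-- ===== PORT B =====
def force_digits_only_alt (tokens : List String) : List String :=
  tokens.map (fun token =>
    let p := token.toList.foldl
      (fun (p : List Char × List Char) ch =>
        if PySem.Chars.isdigit ch then (p.1 ++ [ch], p.2) else (p.1, p.2 ++ [ch]))
      ([], [])
    if p.1.length ≥ p.2.length then String.mk p.1 else String.mk p.2)

-- ===== PRECONDITION & SPEC =====
def Spec_force_digits_only (tokens : List String) (out : List String) : Prop := out = force_digits_only_alt tokens
instance (tokens : List String) (out : List String) : Decidable (Spec_force_digits_only tokens out) := by unfold Spec_force_digits_only; infer_instance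

-- ===== CLAIM (what is proved, stated in full; the proofs are below) =====
def Claim_equal_force_digits_only : Prop := ∀ (tokens : List String), Dom_force_digits_only tokens → Spec_force_digits_only tokens (force_digits_only tokens)

-- ===== LEMMAS AND PROOFS =====

-- A's digit sum is the countP of digits
theorem pv_sum_eq_countP (cs : List Char) (init : Int) :
    (cs.map (fun letter => PySem.Chars.isdigit letter)).foldl
      (fun s b => s + (if b then (1 : Int) else 0)) init
    = init + (cs.countP (fun letter => PySem.Chars.isdigit letter) : Int) := by
  induction cs generalizing init with
  | nil => simp
  | cons c cs ih =>
    simp only [List.map_cons, List.foldl_cons, ih, List.countP_cons]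
    split <;> simp <;> ring

-- B's partition fold produces the two filters
theorem pv_partition_eq (cs : List Char) (p : List Char × List Char) :
    cs.foldl
      (fun (p : List Char × List Char) ch =>
        if PySem.Chars.isdigit ch then (p.1 ++ [ch], p.2) else (p.1, p.2 ++ [ch])) p
    = (p.1 ++ cs.filter (fun letter => PySem.Chars.isdigit letter),
       p.2 ++ cs.filter (fun letter => !PySem.Chars.isdigit letter)) := by
  induction cs generalizing p with
  | nil => simp
  | cons c cs ih =>
    simp only [List.foldl_cons, List.filter_cons]
    by_cases h : PySem.Chars.isdigit c <;> simp [h, ih]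

theorem pv_token_eq (token : String) :
    (let cs := token.toList
     if 2 * ((cs.map (fun letter => PySem.Chars.isdigit letter)).foldl
               (fun s b => s + (if b then (1 : Int) else 0)) 0) ≥ (cs.length : Int) then
       String.mk (cs.filter (fun letter => PySem.Chars.isdigit letter))
     else
       String.mk (cs.filter (fun letter => !PySem.Chars.isdigit letter)))
    = (let p := token.toList.foldl
         (fun (p : List Char × List Char) ch =>
           if PySem.Chars.isdigit ch then (p.1 ++ [ch], p.2) else (p.1, p.2 ++ [ch]))
         ([], [])
       if p.1.length ≥ p.2.length then String.mk p.1 else String.mk p.2) := by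
  simp only [pv_sum_eq_countP, pv_partition_eq, List.nil_append]
  have hlen : (token.toList.countP (fun letter => PySem.Chars.isdigit letter))
      + (token.toList.countP (fun letter => !PySem.Chars.isdigit letter))
      = token.toList.length := by
    simpa using (List.length_eq_countP_add_countP (l := token.toList)
      (p := fun letter => PySem.Chars.isdigit letter)).symm
  have ht : token.length = token.toList.length := by simp
  simp only [← List.countP_eq_length_filter]
  split_ifs with h1 h2 h3 <;> first | rfl | omega

theorem pv_foldl_append (tokens : List String) (acc : List String) :
    tokens.foldl (fun tokens_clean token =>
      let cs := token.toList
      let token_clean :=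
        if 2 * ((cs.map (fun letter => PySem.Chars.isdigit letter)).foldl
                  (fun s b => s + (if b then (1 : Int) else 0)) 0) ≥ (cs.length : Int) then
          String.mk (cs.filter (fun letter => PySem.Chars.isdigit letter))
        else
          String.mk (cs.filter (fun letter => !PySem.Chars.isdigit letter))
      tokens_clean ++ [token_clean]) acc
    = acc ++ tokens.map (fun token =>
        let p := token.toList.foldl
          (fun (p : List Char × List Char) ch =>
            if PySem.Chars.isdigit ch then (p.1 ++ [ch], p.2) else (p.1, p.2 ++ [ch]))
          ([], [])
        if p.1.length ≥ p.2.length then String.mk p.1 else String.mk p.2) := by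
  induction tokens generalizing acc with
  | nil => simp
  | cons t ts ih =>
    simp only [List.foldl_cons, List.map_cons, ih]
    rw [← pv_token_eq t]
    simp

-- ===== VERDICT (by name: the statement is the Claim_ definition above) =====
theorem force_digits_only_spec : Claim_equal_force_digits_only := by
  intro tokens _
  unfold Spec_force_digits_only force_digits_only force_digits_only_alt
  simpa using pv_foldl_append tokens []
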